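-- pv_equiv track=rewrite | github.com/astronomer/astro-sdk | src/astro/databases/snowflake.py | ensure_internal_quotes_closed
-- ===== SOURCE A (Python) =====
-- def ensure_internal_quotes_closed(name: str) -> bool:
--     last_quoted = False
--     for c in name[1:-1]:
--         if last_quoted:
--             if c != '"':
--                 return False
--             last_quoted = False
--         elif c == '"':
--             last_quoted = True
--         # any character is fair game inside a properly quoted name
--
--     if last_quoted:
--         return False  # last quote was not escape
--
--     return True
-- ===== SOURCE B (Python) =====
-- def ensure_internal_quotes_closed(name: str) -> bool:
--     return '"' not in name[1:-1].replace('""', '')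
-- ===== Notes on version B (the rewrite author's own statement) =====
-- stated objective: simpler
-- what changed: Replaces the explicit quote-pairing state machine with a one-line string-transformation test: delete adjacent double-quote pairs once with str.replace on the interior slice and check that no double-quote remains.
import Mathlib
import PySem

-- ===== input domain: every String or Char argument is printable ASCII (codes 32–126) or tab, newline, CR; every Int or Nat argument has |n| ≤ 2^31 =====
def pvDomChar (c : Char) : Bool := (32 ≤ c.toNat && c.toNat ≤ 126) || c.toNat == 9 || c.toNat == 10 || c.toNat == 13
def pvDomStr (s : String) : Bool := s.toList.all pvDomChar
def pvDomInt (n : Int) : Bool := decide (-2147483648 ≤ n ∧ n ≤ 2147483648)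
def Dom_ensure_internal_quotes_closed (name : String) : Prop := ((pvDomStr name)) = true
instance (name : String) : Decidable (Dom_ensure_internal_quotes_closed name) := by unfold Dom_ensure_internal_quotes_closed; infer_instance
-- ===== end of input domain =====

-- B replaces A's quote-pairing state machine with a one-line test: delete adjacent
-- quote pairs once (str.replace) in the interior and check that no quote remains (simpler).

-- ===== PORT A =====
-- the for-loop over name[1:-1] with its early returns, as structural recursion on the chars
def ensure_internal_quotes_closed_loop : List Char → Bool → Bool
  | [], last_quoted => if last_quoted then false else true
  | c :: rest, last_quoted =>
    if last_quoted then
      if c ≠ '"' then false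
      else ensure_internal_quotes_closed_loop rest false
    else if c = '"' then ensure_internal_quotes_closed_loop rest true
    else ensure_internal_quotes_closed_loop rest last_quoted

def ensure_internal_quotes_closed (name : String) : Bool :=
  ensure_internal_quotes_closed_loop (PySem.Str.slice name (some 1) (some (-1))).toList false

-- ===== PORT B =====
def ensure_internal_quotes_closed_alt (name : String) : Bool :=
  !(PySem.Str.isIn "\"" (PySem.Str.replace (PySem.Str.slice name (some 1) (some (-1))) "\"\"" ""))

-- ===== PRECONDITION & SPEC =====
def Spec_ensure_internal_quotes_closed (name : String) (out : Bool) : Prop := out = ensure_internal_quotes_closed_alt name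
instance (name : String) (out : Bool) : Decidable (Spec_ensure_internal_quotes_closed name out) := by unfold Spec_ensure_internal_quotes_closed; infer_instance

-- ===== CLAIM (what is proved, stated in full; the proofs are below) =====
def Claim_equal_ensure_internal_quotes_closed : Prop := ∀ (name : String), Dom_ensure_internal_quotes_closed name → Spec_ensure_internal_quotes_closed name (ensure_internal_quotes_closed name)

-- ===== LEMMAS AND PROOFS =====

-- reference form of Chars.replace l ['"','"'] []: drop adjacent quote pairs, left to right
def pvRep : List Char → List Char
  | [] => []
  | '"' :: '"' :: t => pvRep t
  | c :: t => c :: pvRep t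

lemma pvQuotePrefix (c : Char) (t : List Char) (hp : List.isPrefixOf ['"', '"'] (c :: t) = true) :
    c = '"' ∧ ∃ t', t = '"' :: t' := by
  rw [List.isPrefixOf_iff_prefix] at hp
  obtain ⟨s, hs⟩ := hp
  cases t with
  | nil => simp at hs
  | cons d t' =>
    simp at hs
    exact ⟨hs.1.symm, t', by rw [← hs.2.1]⟩

lemma pvReplace_go_step (n : Nat) (c : Char) (t acc : List Char) :
    PySem.Chars.replace.go ['"', '"'] [] (n+1) (c :: t) acc
    = if List.isPrefixOf ['"', '"'] (c :: t) then
        PySem.Chars.replace.go ['"', '"'] [] n (List.drop 2 (c :: t)) acc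
      else PySem.Chars.replace.go ['"', '"'] [] n t (c :: acc) := by
  rw [PySem.Chars.replace.go]
  simp

lemma pvRep_cons_of_ne (c d : Char) (t : List Char) (h : ¬(c = '"' ∧ d = '"')) :
    pvRep (c :: d :: t) = c :: pvRep (d :: t) := by
  rw [pvRep.eq_def]
  split
  · rename_i heq; simp at heq
  · rename_i t0 heq
    injection heq with h1 h2
    injection h2 with h2 h3
    exact absurd ⟨h1, h2⟩ h
  · rename_i c0 t0 heq
    injection heq with h1 h2
    subst h1; subst h2
    rfl

lemma pvReplace_go_eq : ∀ (fuel : Nat) (l acc : List Char), l.length ≤ fuel →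
    PySem.Chars.replace.go ['"', '"'] [] fuel l acc = acc.reverse ++ pvRep l := by
  intro fuel
  induction fuel with
  | zero =>
    intro l acc h
    have : l = [] := List.eq_nil_of_length_eq_zero (Nat.le_zero.mp h)
    subst this
    simp [PySem.Chars.replace.go, pvRep]
  | succ n ih =>
    intro l acc h
    match l with
    | [] => simp [PySem.Chars.replace.go, pvRep]
    | c :: t =>
      rw [pvReplace_go_step]
      by_cases hp : List.isPrefixOf ['"', '"'] (c :: t) = true
      · obtain ⟨rfl, t', rfl⟩ := pvQuotePrefix c t hp
        rw [if_pos hp]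
        simp only [List.length_cons] at h
        simp only [List.drop_succ_cons, List.drop_zero]
        rw [ih t' acc (by omega)]
        simp [pvRep]
      · rw [if_neg hp]
        simp only [List.length_cons] at h
        rw [ih t (c :: acc) (by omega)]
        cases t with
        | nil => simp [pvRep]
        | cons d t' =>
          have hc : ¬(c = '"' ∧ d = '"') := by
            rintro ⟨rfl, rfl⟩
            exact hp (by rw [List.isPrefixOf_iff_prefix]; exact ⟨t', rfl⟩)
          rw [pvRep_cons_of_ne c d t' hc]
          simp

lemma pvReplace_eq : ∀ l : List Char, PySem.Chars.replace l ['"', '"'] [] = pvRep l := by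
  intro l
  simp [PySem.Chars.replace]
  exact pvReplace_go_eq l.length l [] le_rfl

lemma pvIsIn_singleton (c : Char) : ∀ (l : List Char) (k : Nat),
    (PySem.Chars.find.go [c] l k != -1) = l.contains c := by
  intro l
  induction l with
  | nil => intro k; simp [PySem.Chars.find.go]
  | cons h t ih =>
    intro k
    by_cases hc : c = h
    · subst hc
      simp [PySem.Chars.find.go, List.isPrefixOf]
    · simp [PySem.Chars.find.go, List.isPrefixOf, hc, ih (k + 1)]

lemma pvMain : ∀ (n : Nat) (l : List Char), l.length ≤ n →
    ensure_internal_quotes_closed_loop l false = !((pvRep l).contains '"') := by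
  intro n
  induction n with
  | zero =>
    intro l h
    have : l = [] := List.eq_nil_of_length_eq_zero (Nat.le_zero.mp h)
    subst this
    simp [ensure_internal_quotes_closed_loop, pvRep]
  | succ n ih =>
    intro l h
    match l with
    | [] => simp [ensure_internal_quotes_closed_loop, pvRep]
    | c :: t =>
      by_cases hc : c = '"'
      · subst hc
        match t with
        | [] => simp [ensure_internal_quotes_closed_loop, pvRep]
        | d :: t' =>
          by_cases hd : d = '"'
          · subst hd
            have h1 : ensure_internal_quotes_closed_loop ('"' :: '"' :: t') false
                = ensure_internal_quotes_closed_loop t' false := by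
              simp [ensure_internal_quotes_closed_loop]
            have h2 : pvRep ('"' :: '"' :: t') = pvRep t' := by simp [pvRep]
            rw [h1, h2]
            simp only [List.length_cons] at h
            exact ih t' (by omega)
          · have h2 : pvRep ('"' :: d :: t') = '"' :: pvRep (d :: t') :=
              pvRep_cons_of_ne _ _ _ (by rintro ⟨_, hd2⟩; exact hd hd2)
            rw [h2]
            simp [ensure_internal_quotes_closed_loop, hd]
      · have h1 : ensure_internal_quotes_closed_loop (c :: t) false
            = ensure_internal_quotes_closed_loop t false := by
          simp [ensure_internal_quotes_closed_loop, hc]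
        have h2 : pvRep (c :: t) = c :: pvRep t := by
          cases t with
          | nil => simp [pvRep]
          | cons d t' => exact pvRep_cons_of_ne _ _ _ (by rintro ⟨hc2, _⟩; exact hc hc2)
        rw [h1, h2]
        simp only [List.length_cons] at h
        rw [ih t (by omega)]
        simp [Ne.symm hc]

-- ===== VERDICT (by name: the statement is the Claim_ definition above) =====
theorem ensure_internal_quotes_closed_spec : Claim_equal_ensure_internal_quotes_closed := by
  intro name _
  unfold Spec_ensure_internal_quotes_closed ensure_internal_quotes_closed ensure_internal_quotes_closed_alt
  rw [pvMain (PySem.Str.slice name (some 1) (some (-1))).toList.length _ le_rfl]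
  have h : PySem.Str.isIn "\"" (PySem.Str.replace (PySem.Str.slice name (some 1) (some (-1))) "\"\"" "")
      = ((pvRep (PySem.Str.slice name (some 1) (some (-1))).toList).contains '"') := by
    rw [PySem.Str.isIn_eq]
    unfold PySem.Chars.isIn PySem.Chars.find
    rw [show ("\"" : String).toList = ['"'] from rfl]
    rw [pvIsIn_singleton]
    rw [PySem.Str.toList_replace]
    rw [show ("\"\"" : String).toList = ['"', '"'] from rfl, show ("" : String).toList = [] from rfl]
    rw [pvReplace_eq]
  rw [h]
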